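-- pv_equiv track=rewrite | github.com/epilectrik/voynich | phases/HTD_human_track_domain/htd_tests.py | is_grammar_token
-- ===== SOURCE A (Python) =====
-- GRAMMAR_PREFIXES = {'qo', 'ch', 'sh', 'ok', 'da', 'ot', 'ct', 'kc', 'pc', 'fc', 'ol'}
--
-- GRAMMAR_SUFFIXES = {'aiin', 'dy', 'ol', 'or', 'ar', 'ain', 'ey', 'edy', 'eey'}
--
-- def is_grammar_token(token):
--     """Check if token matches grammar patterns."""
--     t = token.lower()
--     for pf in GRAMMAR_PREFIXES:
--         if t.startswith(pf):
--             return True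
--     for sf in GRAMMAR_SUFFIXES:
--         if t.endswith(sf):
--             return True
--     return False
-- ===== SOURCE B (Python) =====
-- GRAMMAR_PREFIXES = {'qo', 'ch', 'sh', 'ok', 'da', 'ot', 'ct', 'kc', 'pc', 'fc', 'ol'}
-- GRAMMAR_SUFFIXES = {'aiin', 'dy', 'ol', 'or', 'ar', 'ain', 'ey', 'edy', 'eey'}
--
-- _SUF2 = {s for s in GRAMMAR_SUFFIXES if len(s) == 2}
-- _SUF3 = {s for s in GRAMMAR_SUFFIXES if len(s) == 3}
-- _SUF4 = {s for s in GRAMMAR_SUFFIXES if len(s) == 4}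
--
-- def is_grammar_token(token):
--     """Check if token matches grammar patterns."""
--     t = token.lower()
--     return (t[:2] in GRAMMAR_PREFIXES
--             or t[-2:] in _SUF2
--             or t[-3:] in _SUF3
--             or t[-4:] in _SUF4)
-- ===== Notes on version B (the rewrite author's own statement) =====
-- stated objective: idiomatic
-- what changed: The per-pattern startswith/endswith loops are replaced by fixed-length slicing (prefixes are all length 2; suffixes bucketed by length 2/3/4) with direct set membership, removing both scanning loops.
import Mathlib
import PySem

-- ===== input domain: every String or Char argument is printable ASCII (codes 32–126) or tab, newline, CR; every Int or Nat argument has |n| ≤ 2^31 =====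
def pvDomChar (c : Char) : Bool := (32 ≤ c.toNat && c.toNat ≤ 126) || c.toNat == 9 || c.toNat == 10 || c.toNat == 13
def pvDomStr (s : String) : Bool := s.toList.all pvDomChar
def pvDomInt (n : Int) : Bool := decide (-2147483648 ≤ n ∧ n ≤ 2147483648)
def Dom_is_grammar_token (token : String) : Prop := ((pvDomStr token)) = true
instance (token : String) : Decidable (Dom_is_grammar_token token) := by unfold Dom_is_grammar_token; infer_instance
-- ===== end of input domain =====

-- B replaces A's two pattern-scanning loops with fixed-length slices checked against
-- length-bucketed sets (objective: idiomatic). Equivalence of the two ports is proved for all strings.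

-- ===== PORT A =====
-- the module constants GRAMMAR_PREFIXES / GRAMMAR_SUFFIXES (lists of the distinct elements; shared by both ports, as both Pythons read the same module constant)
def pvGrammarPrefixes : List (List Char) :=
  [['q','o'],['c','h'],['s','h'],['o','k'],['d','a'],['o','t'],['c','t'],['k','c'],['p','c'],['f','c'],['o','l']]
def pvSuffixesA : List (List Char) :=
  [['a','i','i','n'],['d','y'],['o','l'],['o','r'],['a','r'],['a','i','n'],['e','y'],['e','d','y'],['e','e','y']]

-- A: lowercase, then two loops with early return True, else False
def is_grammar_token (token : String) : Bool :=
  let t := PySem.Chars.lower token.toList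
  if pvGrammarPrefixes.any (fun pf => PySem.Chars.startswith t pf) then true
  else if pvSuffixesA.any (fun sf => PySem.Chars.endswith t sf) then true
  else false

-- ===== PORT B =====
def pvSuf2 : List (List Char) := [['d','y'],['o','l'],['o','r'],['a','r'],['e','y']]
def pvSuf3 : List (List Char) := [['a','i','n'],['e','d','y'],['e','e','y']]
def pvSuf4 : List (List Char) := [['a','i','i','n']]

-- B: fixed-length slices, membership in length-bucketed sets
def is_grammar_token_alt (token : String) : Bool :=
  let t := PySem.Chars.lower token.toList
  pvGrammarPrefixes.contains (PySem.List.slice t none (some 2))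
  || pvSuf2.contains (PySem.List.slice t (some (-2)) none)
  || pvSuf3.contains (PySem.List.slice t (some (-3)) none)
  || pvSuf4.contains (PySem.List.slice t (some (-4)) none)

-- ===== PRECONDITION & SPEC =====
def Spec_is_grammar_token (token : String) (out : Bool) : Prop := out = is_grammar_token_alt token
instance (token : String) (out : Bool) : Decidable (Spec_is_grammar_token token out) := by unfold Spec_is_grammar_token; infer_instance

-- ===== CLAIM (what is proved, stated in full; the proofs are below) =====
def Claim_equal_is_grammar_token : Prop := ∀ (token : String), Dom_is_grammar_token token → Spec_is_grammar_token token (is_grammar_token token)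

-- ===== LEMMAS AND PROOFS =====
lemma pv_startswith_eq_take (t p : List Char) :
    PySem.Chars.startswith t p = (t.take p.length == p) := by
  rw [Bool.eq_iff_iff, PySem.Chars.startswith_iff, beq_iff_eq, List.prefix_iff_eq_take, eq_comm]

lemma pv_endswith_eq_drop (t p : List Char) :
    PySem.Chars.endswith t p = (t.drop (t.length - p.length) == p) := by
  rw [Bool.eq_iff_iff, PySem.Chars.endswith_iff, beq_iff_eq, List.suffix_iff_eq_drop, eq_comm]

-- ===== VERDICT (by name: the statement is the Claim_ definition above) =====
theorem is_grammar_token_spec : Claim_equal_is_grammar_token := by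
  intro token _
  unfold Spec_is_grammar_token is_grammar_token is_grammar_token_alt
  generalize PySem.Chars.lower token.toList = t
  simp only [pvGrammarPrefixes, pvSuffixesA, pvGrammarPrefixes, pvSuf2, pvSuf3, pvSuf4,
    List.any_cons, List.any_nil, List.contains_cons, List.contains_nil,
    pv_startswith_eq_take, pv_endswith_eq_drop, List.length_cons, List.length_nil]
  rw [PySem.List.slice_to t (by norm_num : (0:Int) ≤ 2)]
  rw [PySem.List.slice_some_none, PySem.List.slice_some_none, PySem.List.slice_some_none]
  norm_num [PySem.List.clampIdx_neg_ofNat]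
  simp only [Bool.beq_eq_decide_eq, show Int.toNat 2 = 2 from rfl]
  ac_rfl
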